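-- pv_equiv track=rewrite | github.com/Neurotech-Hub/HubLink-Server | accounts.py | generate_directory_patterns
-- ===== SOURCE A (Python) =====
-- def generate_directory_patterns(file_keys):
--     """Get unique directory paths from file keys."""
--     directories = {'/'}  # Start with root
--
--     for key in file_keys:
--         if key.startswith('.') or '/' not in key:
--             continue
--
--         # Split the path and build each level
--         parts = key.split('/')
--         current_path = ''
--         for part in parts[:-1]:  # Exclude the filename
--             if part.startswith('.'):
--                 break
--             current_path = f"{current_path}/{part}" if current_path else f"/{part}"
--             directories.add(current_path)
--
--     # Convert to sorted list
--     return sorted(list(directories))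
-- ===== SOURCE B (Python) =====
-- def _dedup_sorted(xs):
--     """Remove duplicates from a sorted list, recursively."""
--     if not xs:
--         return []
--     rest = _dedup_sorted(xs[1:])
--     if rest and rest[0] == xs[0]:
--         return rest
--     return [xs[0]] + rest
--
--
-- def generate_directory_patterns(file_keys):
--     """Get unique directory paths from file keys."""
--     # Stage 1: per key, the leading run of non-hidden directory components.
--     runs = []
--     for key in file_keys:
--         run = []
--         for part in key.split('/')[:-1]:
--             if part.startswith('.'):
--                 break
--             run.append(part)
--         runs.append(run)
--     # Stage 2: every prefix of every run as a path string (duplicates allowed).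
--     candidates = ['/'] + ['/' + '/'.join(run[:i + 1])
--                           for run in runs for i in range(len(run))]
--     # Stage 3: sort, then drop duplicates (now adjacent).
--     return _dedup_sorted(sorted(candidates))
-- ===== Notes on version B (the rewrite author's own statement) =====
-- stated objective: alternative
-- what changed: Replaces A's incrementally maintained deduplicating set (guard clauses, per-key break-loop with a string accumulator, set.add, final sort) by three staged passes: collect each key's leading run of non-dot components, emit every prefix string into a plain list with duplicates, then sort once and remove the now-adjacent duplicates with a recursive dedup of the sorted list.
import Mathlib
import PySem

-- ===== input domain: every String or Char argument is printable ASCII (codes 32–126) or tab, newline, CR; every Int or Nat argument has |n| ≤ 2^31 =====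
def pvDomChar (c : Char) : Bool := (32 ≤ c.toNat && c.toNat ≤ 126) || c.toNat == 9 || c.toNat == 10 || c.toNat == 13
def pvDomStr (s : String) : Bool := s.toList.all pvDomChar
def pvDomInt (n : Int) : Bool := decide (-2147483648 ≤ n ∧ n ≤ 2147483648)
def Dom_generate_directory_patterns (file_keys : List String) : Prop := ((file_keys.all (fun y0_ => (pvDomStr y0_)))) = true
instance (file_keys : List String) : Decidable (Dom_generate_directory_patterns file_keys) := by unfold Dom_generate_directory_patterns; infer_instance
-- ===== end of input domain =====

-- B replaces A's deduplicating set and guard clauses by three staged passes — collect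
-- per-key component runs, emit all prefix strings with duplicates, sort, then remove
-- the now-adjacent duplicates recursively; same return value, objective: alternative.

-- ===== PORT A =====
-- inner loop of A: for part in parts[:-1]: break on '.', accumulate current_path, add to set
def pvA_inner : List (List Char) → List Char → PySem.Set (List Char) → PySem.Set (List Char)
  | [], _, dirs => dirs
  | p :: rest, cur, dirs =>
    if PySem.Chars.startswith p ['.'] then dirs
    else
      let cur' := if cur ≠ [] then cur ++ '/' :: p else '/' :: p
      pvA_inner rest cur' (PySem.Set.add dirs cur')

def pvStepA (dirs : PySem.Set (List Char)) (key : String) : PySem.Set (List Char) :=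
  let k := key.toList
  if PySem.Chars.startswith k ['.'] || !(PySem.Chars.isIn ['/'] k) then dirs
  else pvA_inner ((PySem.Chars.splitOn k ['/']).dropLast) [] dirs

def generate_directory_patterns (file_keys : List String) : List String :=
  let dirs := file_keys.foldl pvStepA (PySem.Set.ofList [['/']])
  (PySem.List.sorted dirs (fun cs => String.ofList cs) false).map String.ofList

-- ===== PORT B =====
-- stage-1 inner loop of Source B: append parts into run, break on a '.'-component
def pvRun : List (List Char) → List (List Char)
  | [] => []
  | p :: rest => if PySem.Chars.startswith p ['.'] then [] else p :: pvRun rest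

-- Source B's _dedup_sorted: recursive removal of duplicates from a sorted list
def pvDedup : List (List Char) → List (List Char)
  | [] => []
  | x :: xs =>
    let rest := pvDedup xs
    if rest.head? = some x then rest else x :: rest

def generate_directory_patterns_alt (file_keys : List String) : List String :=
  let runs := file_keys.map (fun key => pvRun ((PySem.Chars.splitOn key.toList ['/']).dropLast))
  let candidates := ['/'] :: runs.flatMap (fun run =>
    (List.range run.length).map (fun i => '/' :: PySem.Chars.join ['/'] (run.take (i + 1))))
  (pvDedup (PySem.List.sorted candidates (fun cs => String.ofList cs) false)).map String.ofList

-- ===== PRECONDITION & SPEC =====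
def Spec_generate_directory_patterns (file_keys : List String) (out : List String) : Prop := out = generate_directory_patterns_alt file_keys
instance (file_keys : List String) (out : List String) : Decidable (Spec_generate_directory_patterns file_keys out) := by unfold Spec_generate_directory_patterns; infer_instance

-- ===== CLAIM (what is proved, stated in full; the proofs are below) =====
def Claim_equal_generate_directory_patterns : Prop := ∀ (file_keys : List String), Dom_generate_directory_patterns file_keys → Spec_generate_directory_patterns file_keys (generate_directory_patterns file_keys)

-- ===== LEMMAS AND PROOFS =====

-- the per-key prefix list both programs effectively add, as one expression
def pvKeep : List (List Char) → Nat
  | [] => 0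
  | p :: rest => if PySem.Chars.startswith p ['.'] then 0 else pvKeep rest + 1

def pvPfx (key : String) : List (List Char) :=
  let parts := (PySem.Chars.splitOn key.toList ['/']).dropLast
  (List.range (pvKeep parts)).map (fun i => '/' :: PySem.Chars.join ['/'] (parts.take (i + 1)))

-- structural version of str.split on the single-char separator '/'
def pvSplitAux : List Char → List Char → List (List Char)
  | pre, [] => [pre]
  | pre, c :: rest => if c = '/' then pre :: pvSplitAux [] rest else pvSplitAux (pre ++ [c]) rest

lemma pvGo_eq : ∀ (l : List Char) (fuel : Nat) (cur : List Char) (acc : List (List Char)),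
    l.length < fuel →
    PySem.Chars.splitOn.go ['/'] fuel l cur acc = acc.reverse ++ pvSplitAux cur.reverse l := by
  intro l
  induction l with
  | nil =>
    intro fuel cur acc h
    match fuel, h with
    | fuel + 1, _ => simp [PySem.Chars.splitOn.go, pvSplitAux]
  | cons c rest ih =>
    intro fuel cur acc h
    match fuel, h with
    | fuel + 1, h =>
      simp only [PySem.Chars.splitOn.go]
      by_cases hc : c = '/'
      · subst hc
        simp only [List.isPrefixOf, List.length] at *
        rw [if_pos (by simp)]
        have hd : List.drop (0 + 1) ('/' :: rest) = rest := rfl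
        rw [hd, ih fuel [] (cur.reverse :: acc) (Nat.lt_of_succ_lt_succ h)]
        simp [pvSplitAux]
      · rw [if_neg (by simp [List.isPrefixOf]; intro h'; exact hc h'.symm)]
        rw [ih fuel (c :: cur) acc (Nat.lt_of_succ_lt_succ h)]
        simp [pvSplitAux, hc]

lemma pvSplitOn_eq (k : List Char) : PySem.Chars.splitOn k ['/'] = pvSplitAux [] k := by
  simpa using pvGo_eq k (k.length + 1) [] [] (Nat.lt_succ_self _)

lemma pvSplitAux_no_slash : ∀ (l pre : List Char), '/' ∉ l → pvSplitAux pre l = [pre ++ l] := by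
  intro l
  induction l with
  | nil => intro pre _; simp [pvSplitAux]
  | cons c rest ih =>
    intro pre h
    have hc : c ≠ '/' := fun e => h (by simp [e])
    simp only [pvSplitAux, if_neg hc]
    rw [ih (pre ++ [c]) (fun e => h (by simp [e]))]
    simp

lemma pvSplitAux_head : ∀ (l pre : List Char), ∃ t rest, pvSplitAux pre l = (pre ++ t) :: rest := by
  intro l
  induction l with
  | nil => intro pre; exact ⟨[], [], by simp [pvSplitAux]⟩
  | cons c rest ih =>
    intro pre
    by_cases hc : c = '/'
    · exact ⟨[], pvSplitAux [] rest, by simp [pvSplitAux, hc]⟩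
    · obtain ⟨t, r, hr⟩ := ih (pre ++ [c])
      exact ⟨c :: t, r, by simp [pvSplitAux, hc, hr]⟩

lemma pvUpdate_cons {α : Type} [BEq α] (s : PySem.Set α) (x : α) (xs : List α) :
    PySem.Set.update s (x :: xs) = PySem.Set.update (PySem.Set.add s x) xs := rfl

lemma pvA_inner_eq : ∀ (parts : List (List Char)) (cur : List Char) (dirs : PySem.Set (List Char)),
    pvA_inner parts cur dirs =
      PySem.Set.update dirs ((List.range (pvKeep parts)).map
        (fun i => cur ++ '/' :: PySem.Chars.join ['/'] (parts.take (i + 1)))) := by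
  intro parts
  induction parts with
  | nil => intro cur dirs; simp [pvA_inner, pvKeep]
  | cons p rest ih =>
    intro cur dirs
    by_cases hp : PySem.Chars.startswith p ['.']
    · simp [pvA_inner, pvKeep, hp]
    · have hcur : (if cur ≠ [] then cur ++ '/' :: p else '/' :: p) = cur ++ '/' :: p := by
        by_cases hc : cur = [] <;> simp [hc]
      simp only [pvA_inner, if_neg hp, hcur, pvKeep]
      rw [ih (cur ++ '/' :: p)]
      rw [List.range_succ_eq_map, List.map_cons, List.map_map]
      rw [pvUpdate_cons]
      have h0 : cur ++ '/' :: PySem.Chars.join ['/'] ((p :: rest).take 1) = cur ++ '/' :: p := by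
        simp [PySem.Chars.join_singleton]
      rw [h0]
      congr 1
      apply List.map_congr_left
      intro i hi
      have hi' : i < pvKeep rest := List.mem_range.mp hi
      have hrest : rest ≠ [] := by
        intro e; rw [e] at hi'; simp [pvKeep] at hi'
      obtain ⟨q, t, ht⟩ : ∃ q t, rest.take (i + 1) = q :: t := by
        cases rest with
        | nil => exact absurd rfl hrest
        | cons a as => exact ⟨a, as.take i, by simp⟩
      simp only [Function.comp, List.take_succ_cons, ht,
        PySem.Chars.join_cons_cons]
      simp

-- A's per-key step is exactly 'update with the prefix list pvPfx key'
lemma pvStepA_eq (dirs : PySem.Set (List Char)) (key : String) :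
    pvStepA dirs key = PySem.Set.update dirs (pvPfx key) := by
  simp only [pvStepA, pvPfx]
  rw [pvSplitOn_eq]
  by_cases h1 : PySem.Chars.startswith key.toList ['.']
  · obtain ⟨t, ht'⟩ := (PySem.Chars.startswith_iff _ _).mp h1
    have ht : key.toList = '.' :: t := ht'.symm
    have hdot : '.' ≠ '/' := by decide
    have hsplit : pvSplitAux [] key.toList = pvSplitAux ['.'] t := by
      rw [ht]; simp [pvSplitAux, hdot]
    obtain ⟨t', r', hr'⟩ := pvSplitAux_head t ['.']
    have hkeep : pvKeep ((pvSplitAux [] key.toList).dropLast) = 0 := by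
      simp only [List.cons_append, List.nil_append] at hr'
      rw [hsplit, hr']
      cases r' with
      | nil => simp [pvKeep]
      | cons b bs =>
        have : (('.' :: t') :: b :: bs).dropLast = ('.' :: t') :: (b :: bs).dropLast := by
          simp [List.dropLast_cons₂]
        rw [this]
        have hsw : PySem.Chars.startswith ('.' :: t') ['.'] = true := by
          exact (PySem.Chars.startswith_iff _ _).mpr ⟨t', rfl⟩
        simp [pvKeep, hsw]
    simp [h1, hkeep]
  · by_cases h2 : PySem.Chars.isIn ['/'] key.toList
    · rw [if_neg (by simp [h1, h2])]
      rw [pvA_inner_eq]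
      simp
    · have hns : '/' ∉ key.toList := by
        intro hm
        obtain ⟨s, t, hst⟩ := List.mem_iff_append.mp hm
        exact h2 ((PySem.Chars.isIn_iff_infix _ _).mpr ⟨s, t, by simp [hst]⟩)
      have hone : pvSplitAux [] key.toList = [key.toList] := by
        simpa using pvSplitAux_no_slash key.toList [] hns
      simp [h1, h2, hone, pvKeep]

-- membership in A's accumulated set
lemma pvMem_foldA : ∀ (keys : List String) (s : PySem.Set (List Char)) (x : List Char),
    x ∈ keys.foldl pvStepA s ↔ x ∈ s ∨ ∃ k ∈ keys, x ∈ pvPfx k := by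
  intro keys
  induction keys with
  | nil => intro s x; simp
  | cons k ks ih =>
    intro s x
    simp only [List.foldl_cons, pvStepA_eq, ih, PySem.Set.mem_update, List.mem_cons]
    constructor
    · rintro (⟨h | h⟩ | ⟨k', hk', hx⟩)
      · exact Or.inl h
      · exact Or.inr ⟨k, Or.inl rfl, h⟩
      · exact Or.inr ⟨k', Or.inr hk', hx⟩
    · rintro (h | ⟨k', (rfl | hk'), hx⟩)
      · exact Or.inl (Or.inl h)
      · exact Or.inl (Or.inr hx)
      · exact Or.inr ⟨k', hk', hx⟩

lemma pvNodup_foldA : ∀ (keys : List String) (s : PySem.Set (List Char)),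
    s.Nodup → (keys.foldl pvStepA s).Nodup := by
  intro keys
  induction keys with
  | nil => intro s h; exact h
  | cons k ks ih =>
    intro s h
    simp only [List.foldl_cons, pvStepA_eq]
    exact ih _ (PySem.Set.nodup_update _ _ h)

-- pvRun is the leading-run take
lemma pvRun_eq_take : ∀ parts : List (List Char), pvRun parts = parts.take (pvKeep parts) := by
  intro parts
  induction parts with
  | nil => simp [pvRun, pvKeep]
  | cons p rest ih =>
    by_cases hp : PySem.Chars.startswith p ['.']
    · simp [pvRun, pvKeep, hp]
    · simp [pvRun, pvKeep, hp, ih]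

lemma pvKeep_le_length : ∀ parts : List (List Char), pvKeep parts ≤ parts.length := by
  intro parts
  induction parts with
  | nil => simp [pvKeep]
  | cons p rest ih =>
    by_cases hp : PySem.Chars.startswith p ['.']
    · simp [pvKeep, hp]
    · simp [pvKeep, hp]
      omega

-- B's per-run prefix list is pvPfx
lemma pvRunPfx_eq (key : String) :
    ((List.range (pvRun ((PySem.Chars.splitOn key.toList ['/']).dropLast)).length).map
      (fun i => '/' :: PySem.Chars.join ['/']
        ((pvRun ((PySem.Chars.splitOn key.toList ['/']).dropLast)).take (i + 1)))) = pvPfx key := by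
  set parts := (PySem.Chars.splitOn key.toList ['/']).dropLast with hparts
  have hrun : pvRun parts = parts.take (pvKeep parts) := pvRun_eq_take parts
  have hlen : (pvRun parts).length = pvKeep parts := by
    rw [hrun, List.length_take]
    exact Nat.min_eq_left (pvKeep_le_length parts)
  simp only [pvPfx, hlen, ← hparts]
  apply List.map_congr_left
  intro i hi
  have hi' : i < pvKeep parts := List.mem_range.mp hi
  rw [hrun, List.take_take, Nat.min_eq_left (by omega)]

-- membership in B's candidate list
lemma pvMem_candidates (file_keys : List String) (x : List Char) :
    (x ∈ ['/'] :: (file_keys.map (fun key => pvRun ((PySem.Chars.splitOn key.toList ['/']).dropLast))).flatMap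
      (fun run => (List.range run.length).map (fun i => '/' :: PySem.Chars.join ['/'] (run.take (i + 1))))) ↔
    x = ['/'] ∨ ∃ k ∈ file_keys, x ∈ pvPfx k := by
  rw [List.flatMap_map]
  simp only [pvRunPfx_eq, List.mem_cons, List.mem_flatMap]

-- pvDedup keeps exactly the members
lemma pvMem_dedup : ∀ (l : List (List Char)) (x : List Char), x ∈ pvDedup l ↔ x ∈ l := by
  intro l
  induction l with
  | nil => simp [pvDedup]
  | cons a t ih =>
    intro x
    simp only [pvDedup, List.mem_cons, ← ih x]
    cases hr : pvDedup t with
    | nil => simp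
    | cons y ys =>
      simp only [List.head?_cons]
      by_cases hy : y = a
      · rw [if_pos (by simp [hy])]
        subst hy
        simp only [List.mem_cons]
        tauto
      · rw [if_neg (by simp [hy])]
        simp only [List.mem_cons]

-- on a ≤-sorted list, pvDedup gives a strictly <-sorted list (key = String.ofList)
lemma pvDedup_pairwise_lt : ∀ (l : List (List Char)),
    l.Pairwise (fun a b => String.ofList a ≤ String.ofList b) →
    (pvDedup l).Pairwise (fun a b => String.ofList a < String.ofList b) := by
  intro l
  induction l with
  | nil => intro _; simp [pvDedup]
  | cons a t ih =>
    intro h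
    rw [List.pairwise_cons] at h
    obtain ⟨hle, ht⟩ := h
    have hrest := ih ht
    simp only [pvDedup]
    cases hr : pvDedup t with
    | nil => simp
    | cons y ys =>
      rw [hr] at hrest
      simp only [List.head?_cons]
      by_cases hy : y = a
      · rw [if_pos (by simp [hy])]; exact hrest
      · rw [if_neg (by simp [hy])]
        rw [List.pairwise_cons]
        refine ⟨?_, hrest⟩
        intro z hz
        have hzt : z ∈ t := (pvMem_dedup t z).mp (hr ▸ hz)
        rcases lt_or_eq_of_le (hle z hzt) with hlt | heq
        · exact hlt
        · exfalso
          have haz : a = z := String.ofList_inj.mp heq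
          subst haz
          rcases List.mem_cons.mp hz with hz' | hz'
          · exact hy hz'.symm
          · have h1 : String.ofList y < String.ofList a :=
              (List.pairwise_cons.mp hrest).1 a hz'
            have hyt : y ∈ t := (pvMem_dedup t y).mp (by simp [hr])
            exact absurd (hle y hyt) (not_le_of_gt h1)

-- pairwise-< lists over an injective key have no duplicates
lemma pvPairwise_lt_nodup (l : List (List Char))
    (h : l.Pairwise (fun a b => String.ofList a < String.ofList b)) : l.Nodup :=
  h.imp (fun hab => by rintro rfl; exact lt_irrefl _ hab)

-- ===== VERDICT (by name: the statement is the Claim_ definition above) =====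
theorem generate_directory_patterns_spec : Claim_equal_generate_directory_patterns := by
  intro file_keys _
  unfold Spec_generate_directory_patterns generate_directory_patterns generate_directory_patterns_alt
  apply congrArg
  set SA := file_keys.foldl pvStepA (PySem.Set.ofList [['/']]) with hSA
  set cands := (['/'] :: (file_keys.map (fun key => pvRun ((PySem.Chars.splitOn key.toList ['/']).dropLast))).flatMap
    (fun run => (List.range run.length).map (fun i => '/' :: PySem.Chars.join ['/'] (run.take (i + 1))))) with hcands
  have hsortle : (PySem.List.sorted cands (fun cs => String.ofList cs) false).Pairwise
      (fun a b => String.ofList a ≤ String.ofList b) := PySem.List.sorted_pairwise _ _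
  have hlt := pvDedup_pairwise_lt _ hsortle
  have hnodupB := pvPairwise_lt_nodup _ hlt
  have hnodupA : SA.Nodup := pvNodup_foldA file_keys _ (PySem.Set.nodup_ofList _)
  have hmem : ∀ x, x ∈ pvDedup (PySem.List.sorted cands (fun cs => String.ofList cs) false) ↔ x ∈ SA := by
    intro x
    rw [pvMem_dedup, PySem.List.mem_sorted, hSA, pvMem_foldA, hcands, pvMem_candidates]
    simp [PySem.Set.mem_ofList]
  have hperm : (pvDedup (PySem.List.sorted cands (fun cs => String.ofList cs) false)).Perm SA :=
    (List.perm_ext_iff_of_nodup hnodupB hnodupA).mpr hmem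
  exact PySem.List.sorted_eq_of_perm_of_pairwise_lt _ _ _ hperm hlt
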